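-- pv_equiv track=rewrite | github.com/fjelltopp/meerkat_auth | meerkat_auth/authorise.py | check_access
-- ===== SOURCE A (Python) =====
-- def check_access(access, countries, acc):
--     """
--     Compares the access levels specified in the require_jwt decorator with the access
--     levels specified in the given jwt. Returns a boolean stating whether there is a match.
--
--     Accepts "" as a wildcard country, meaning any country.
--
--     Args:
--         access ([str]) A list of role titles that meet the qauthorisation requirements.
--         countries ([str]) An optional list of countries for which each role
--             title correspond to. access[0] corresponds to country[0] and so on...
--             If the length of countries is smaller than the length of access, then
--             the final element of countries is repeated to make the length match.
--             Accepts wildcard value "" for any country.  Default value is [""], meaning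
--             all specified access levels will be valid for any country if countires is
--             not specified.
--
--     Returns:
--         bool True if authorised, False if unauthorised.
--     """
--     #Set the countries array to match the length of the access array.
--     if len(countries) < len(access):
--         j = len(countries)
--         for i in range(j,len(access)):
--             countries.append( countries[j-1] )
--
--     authorised = False
--
--     #For each country specified by the decorator...
--     for i in range(0,len(countries)):
--         country = countries[i]
--         #...if that country is specified in the token...
--         if country in acc:
--             #...and if the corresponding country's role is specified in the token...
--             if access[i] in acc[country]:
--                 #...then authorise.
--                 authorised = True
--                 break
--
--         #...Else if the country specified by the decorator is "" (the wildcard)...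
--         elif country == "":
--             #...Look through all countries specified in the jwt...
--             for c in acc:
--                 #...if any access level in jwt matches a level in the decorator...
--                 if access[i] in acc[c]:
--                     #....then authorise.
--                     authorised = True
--                     break
--
--     return authorised
-- ===== SOURCE B (Python) =====
-- def check_access(access, countries, acc):
--     """Same contract as A. Mutates `countries` in place exactly like A
--     (pads it with copies of its last element up to len(access))."""
--     if len(countries) < len(access):
--         countries.extend([countries[-1]] * (len(access) - len(countries)))
--     # One precomputed union of every access level present under any country,
--     # so the wildcard "" check needs no inner scan over the dict.
--     any_level = set()
--     for levels in acc.values():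
--         any_level.update(levels)
--     return any(
--         role in acc[country] if country in acc
--         else (country == "" and role in any_level)
--         for country, role in zip(countries, access)
--     )
-- ===== Notes on version B (the rewrite author's own statement) =====
-- stated objective: simpler
-- what changed: B precomputes once the union set of all access levels in the token, replacing A's inner scan over the whole dict at every wildcard index, and replaces A's index loop with a flag and break by a single any() over zip(countries, access).
import Mathlib
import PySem

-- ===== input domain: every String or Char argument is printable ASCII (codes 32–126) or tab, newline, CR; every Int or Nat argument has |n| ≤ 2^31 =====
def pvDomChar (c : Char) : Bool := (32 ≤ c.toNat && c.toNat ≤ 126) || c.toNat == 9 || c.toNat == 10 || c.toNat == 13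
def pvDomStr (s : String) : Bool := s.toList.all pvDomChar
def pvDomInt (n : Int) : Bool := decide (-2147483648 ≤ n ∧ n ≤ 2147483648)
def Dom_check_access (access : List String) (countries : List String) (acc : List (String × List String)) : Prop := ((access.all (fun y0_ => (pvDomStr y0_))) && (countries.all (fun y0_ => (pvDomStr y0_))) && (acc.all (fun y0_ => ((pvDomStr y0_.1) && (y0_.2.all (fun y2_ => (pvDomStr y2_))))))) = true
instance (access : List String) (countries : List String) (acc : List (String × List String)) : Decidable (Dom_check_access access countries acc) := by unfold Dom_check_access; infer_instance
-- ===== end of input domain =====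

-- B replaces A's per-wildcard inner scan over the whole dict by one precomputed
-- union set of all access levels, and A's index loop with flag and break by a
-- single any() over zip(countries, access).  Both Pythons mutate `countries` in
-- place identically (padding with the last element); the equivalence proved
-- here is about the return value.

-- ===== PORT A =====
-- the `for i in range(j, len(access)): countries.append(countries[j-1])` loop
def ca_extend (j : Int) : List Int → List String → List String
  | [], cur => cur
  | _ :: rest, cur => ca_extend j rest (cur ++ [PySem.List.pyGetD cur (j - 1) ""])

-- the inner `for c in acc: if access[i] in acc[c]: … break` loop
def ca_inner (accD : PySem.Dict String (List String)) (target : String) : List String → Bool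
  | [] => false
  | c :: rest =>
    if target ∈ accD.getD c [] then true else ca_inner accD target rest

-- the outer `for i in range(0, len(countries))` loop with the `authorised` flag
def ca_loop (access countries : List String) (accD : PySem.Dict String (List String))
    (authorised : Bool) : List Int → Bool
  | [] => authorised
  | i :: rest =>
    let country := PySem.List.pyGetD countries i ""
    if accD.contains country then
      if PySem.List.pyGetD access i "" ∈ accD.getD country [] then true
      else ca_loop access countries accD authorised rest
    else if country = "" then
      ca_loop access countries accD
        (authorised || ca_inner accD (PySem.List.pyGetD access i "") accD.keys) rest
    else ca_loop access countries accD authorised rest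

-- L4

def check_access (access : List String) (countries : List String) (acc : List (String × List String)) : Bool :=
  let accD : PySem.Dict String (List String) := PySem.Dict.mk acc
  let countries' :=
    if countries.length < access.length then
      ca_extend (countries.length : Int)
        (PySem.List.pyRange (countries.length : Int) (access.length : Int) 1) countries
    else countries
  ca_loop access countries' accD false
    (PySem.List.pyRange 0 (countries'.length : Int) 1)

-- ===== PORT B =====
def check_access_alt (access : List String) (countries : List String) (acc : List (String × List String)) : Bool :=
  let accD : PySem.Dict String (List String) := PySem.Dict.mk acc
  let countries' :=
    if countries.length < access.length then
      countries ++ List.replicate (access.length - countries.length)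
        (PySem.List.pyGetD countries (-1) "")
    else countries
  let any_level : PySem.Set String :=
    accD.values.foldl (fun s levels => PySem.Set.update s levels) PySem.Set.empty
  (countries'.zip access).any (fun p =>
    match accD.get? p.1 with
    | some levels => p.2 ∈ levels
    | none => p.1 == "" && p.2 ∈ any_level)

-- ===== PRECONDITION & SPEC =====
-- Pre_ excludes exactly the inputs where the Python A raises IndexError (empty
-- `countries` with nonempty `access`, or a trailing country beyond `access`'s
-- length that is a key of `acc` or the wildcard "" and is reached because no
-- earlier direct country/role match breaks the loop first), plus association
-- lists with duplicate keys, which cannot arise from a Python dict.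
def Pre_check_access (access : List String) (countries : List String) (acc : List (String × List String)) : Prop :=
  (acc.map Prod.fst).Nodup ∧
  (access ≠ [] → countries ≠ []) ∧
  ((∀ c ∈ countries.drop access.length,
      (PySem.Dict.mk acc).contains c = false ∧ c ≠ "") ∨
   (∃ p ∈ countries.zip access, ∃ levels,
      (PySem.Dict.mk acc).get? p.1 = some levels ∧ p.2 ∈ levels))
instance (access : List String) (countries : List String) (acc : List (String × List String)) : Decidable (Pre_check_access access countries acc) := by unfold Pre_check_access; infer_instance

def pvWitness_check_access : List String × List String × (List (String × List String)) :=
  (["admin"], [""], [("GB", ["admin", "user"])])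

def Spec_check_access (access : List String) (countries : List String) (acc : List (String × List String)) (out : Bool) : Prop := out = check_access_alt access countries acc
instance (access : List String) (countries : List String) (acc : List (String × List String)) (out : Bool) : Decidable (Spec_check_access access countries acc out) := by unfold Spec_check_access; infer_instance

-- ===== CLAIM (what is proved, stated in full; the proofs are below) =====
def Claim_equal_check_access : Prop := ∀ (access : List String) (countries : List String) (acc : List (String × List String)), Dom_check_access access countries acc → Pre_check_access access countries acc → Spec_check_access access countries acc (check_access access countries acc)

-- ===== LEMMAS AND PROOFS =====

theorem ca_extend_eq (l : List Int) (cur : List String) (j : Int)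
    (h0 : 0 < j) (h1 : j ≤ cur.length) :
    ca_extend j l cur = cur ++ List.replicate l.length (PySem.List.pyGetD cur (j - 1) "") := by
  induction l generalizing cur with
  | nil => simp [ca_extend]
  | cons x rest ih =>
    rw [ca_extend, ih _ (by simp; omega)]
    have hj : PySem.List.pyGetD (cur ++ [PySem.List.pyGetD cur (j - 1) ""]) (j - 1) ""
        = PySem.List.pyGetD cur (j - 1) "" := by
      have hc : j - 1 < (cur.length : Int) := by omega
      rw [PySem.List.pyGetD_eq_getElem cur "" (by omega) hc]
      rw [PySem.List.pyGetD_eq_getElem _ "" (by omega) (by simp; omega)]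
      exact List.getElem_append_left (by omega)
    rw [hj]
    simp [List.replicate_succ]

-- L2

theorem ca_inner_eq (accD : PySem.Dict String (List String)) (t : String) (ks : List String) :
    ca_inner accD t ks = ks.any (fun c => decide (t ∈ accD.getD c [])) := by
  induction ks with
  | nil => rfl
  | cons c rest ih => by_cases h : t ∈ accD.getD c [] <;> simp [ca_inner, h, ih]

theorem mem_foldl_update (ls : List (List String)) (s : PySem.Set String) (t : String) :
    t ∈ ls.foldl (fun s l => PySem.Set.update s l) s ↔ t ∈ s ∨ ∃ l ∈ ls, t ∈ l := by
  induction ls generalizing s with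
  | nil => simp
  | cons l rest ih => simp [ih, PySem.Set.mem_update]; tauto

theorem ca_inner_keys_eq' (accD : PySem.Dict String (List String)) (t : String)
    (hnd : accD.keys.Nodup) :
    ca_inner accD t accD.keys
      = decide (t ∈ accD.values.foldl (fun s levels => PySem.Set.update s levels) PySem.Set.empty) := by
  rw [ca_inner_eq]
  rw [PySem.Dict.values_eq_map_keys accD hnd []]
  simp [mem_foldl_update, PySem.Set.empty]
  rw [Bool.eq_iff_iff]
  simp [List.any_eq_true]


-- The loop body's per-pair test, as B writes it

-- the per-pair test of B's any(), factored for the loop lemmas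
def ca_f (accD : PySem.Dict String (List String)) (p : String × String) : Bool :=
  match accD.get? p.1 with
  | some levels => p.2 ∈ levels
  | none => p.1 == "" && p.2 ∈ accD.values.foldl (fun s levels => PySem.Set.update s levels) PySem.Set.empty

theorem ca_loop_safe (access cs : List String) (accD : PySem.Dict String (List String))
    (hnd : accD.keys.Nodup)
    (safe : ∀ c ∈ cs.drop access.length, accD.contains c = false ∧ c ≠ "") :
    ∀ (n i : Nat) (auth : Bool), cs.length ≤ i + n →
      ca_loop access cs accD auth (PySem.List.pyRange (i : Int) (cs.length : Int) 1)
        = (auth || ((cs.drop i).zip (access.drop i)).any (ca_f accD)) := by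
  intro n
  induction n with
  | zero =>
    intro i auth hle
    rw [PySem.List.pyRange_one_eq_nil (by exact_mod_cast hle)]
    rw [List.drop_eq_nil_of_le (by omega)]
    simp [ca_loop]
  | succ n ih =>
    intro i auth hle
    by_cases hi : cs.length ≤ i
    · rw [PySem.List.pyRange_one_eq_nil (by exact_mod_cast hi)]
      rw [List.drop_eq_nil_of_le (by omega)]
      simp [ca_loop]
    · rw [not_le] at hi
      rw [PySem.List.pyRange_one_cons (by exact_mod_cast hi)]
      have hcast : ((i : Int) + 1) = ((i + 1 : Nat) : Int) := by push_cast; ring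
      rw [hcast]
      have hcountry : PySem.List.pyGetD cs (i : Int) "" = cs[i] := by
        rw [PySem.List.pyGetD_eq_getElem cs "" (by positivity) (by exact_mod_cast hi)]
        simp
      rw [ca_loop]
      simp only [hcountry]
      rw [List.drop_eq_getElem_cons hi]
      by_cases ha : i < access.length
      · rw [List.drop_eq_getElem_cons ha]
        simp only [List.zip_cons_cons, List.any_cons]
        have haccess : PySem.List.pyGetD access (i : Int) "" = access[i] := by
          rw [PySem.List.pyGetD_eq_getElem access "" (by positivity) (by exact_mod_cast ha)]
          simp
        by_cases hc : accD.contains cs[i]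
        · have hsome : (accD.get? cs[i]).isSome := by
            rw [← PySem.Dict.contains_eq_isSome_get?]; exact hc
          obtain ⟨lv, hlv⟩ := Option.isSome_iff_exists.mp hsome
          have hgetD : accD.getD cs[i] [] = lv := PySem.Dict.getD_of_get?_eq_some _ _ hlv
          rw [if_pos hc, haccess, hgetD]
          by_cases hm : access[i] ∈ lv
          · simp [hm, ca_f, hlv]
          · rw [if_neg hm, ih (i+1) auth (by omega)]
            simp [ca_f, hlv, hm]
        · have hnone : accD.get? cs[i] = none := by
            rw [← Option.not_isSome_iff_eq_none, ← PySem.Dict.contains_eq_isSome_get?]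
            simpa using hc
          rw [if_neg hc]
          by_cases hw : cs[i] = ""
          · rw [if_pos hw, ih (i+1) _ (by omega), haccess,
                ca_inner_keys_eq' accD _ hnd]
            rw [hw] at hnone
            have hf : ca_f accD (cs[i], access[i])
                = decide (access[i] ∈ accD.values.foldl (fun s levels => PySem.Set.update s levels) PySem.Set.empty) := by
              simp [ca_f, hw, hnone]
            rw [hf]
            cases auth <;> cases hd : (decide (access[i] ∈ accD.values.foldl (fun s levels => PySem.Set.update s levels) PySem.Set.empty)) <;> simp
          · rw [if_neg hw, ih (i+1) auth (by omega)]
            have hf : ca_f accD (cs[i], access[i]) = false := by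
              simp [ca_f, hnone, hw]
            rw [hf]
            simp
      · -- trailing country beyond access: safe, contributes nothing
        rw [not_lt] at ha
        have hmem : cs[i] ∈ cs.drop access.length := by
          have hgd : cs[i] = (cs.drop access.length)[i - access.length]'(by simp; omega) := by
            rw [List.getElem_drop]
            congr 1
            omega
          rw [hgd]
          exact List.getElem_mem _
        obtain ⟨hnc, hne⟩ := safe _ hmem
        have hda : access.drop i = [] := List.drop_eq_nil_of_le (by omega)
        have hda2 : access.drop (i+1) = [] := List.drop_eq_nil_of_le (by omega)
        rw [if_neg (by simp [hnc]), if_neg hne, ih (i+1) auth (by omega)]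
        simp [hda, hda2]

theorem ca_loop_hit (access cs : List String) (accD : PySem.Dict String (List String)) :
    ∀ (n i : Nat) (auth : Bool), cs.length ≤ i + n →
      (∃ k, i ≤ k ∧ k < cs.length ∧ k < access.length ∧
        ∃ lv, accD.get? (cs.getD k "") = some lv ∧ access.getD k "" ∈ lv) →
      ca_loop access cs accD auth (PySem.List.pyRange (i : Int) (cs.length : Int) 1) = true := by
  intro n
  induction n with
  | zero =>
    intro i auth hle hk
    obtain ⟨k, h1, h2, -⟩ := hk
    omega
  | succ n ih =>
    intro i auth hle hk
    obtain ⟨k, hik, hkc, hka, lv, hlv, hm⟩ := hk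
    have hi : i < cs.length := by omega
    rw [PySem.List.pyRange_one_cons (by exact_mod_cast hi)]
    have hcast : ((i : Int) + 1) = ((i + 1 : Nat) : Int) := by push_cast; ring
    rw [hcast]
    have hcountry : PySem.List.pyGetD cs (i : Int) "" = cs[i] := by
      rw [PySem.List.pyGetD_eq_getElem cs "" (by positivity) (by exact_mod_cast hi)]
      simp
    rw [ca_loop]
    simp only [hcountry]
    by_cases hki : k = i
    · -- the direct match is at this very index: the first branch fires
      subst hki
      have hgd : cs.getD k "" = cs[k] := List.getD_eq_getElem cs "" hkc
      rw [hgd] at hlv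
      have hc : accD.contains cs[k] = true := by
        rw [PySem.Dict.contains_eq_isSome_get?, hlv]
        rfl
      have hgetD : accD.getD cs[k] [] = lv := PySem.Dict.getD_of_get?_eq_some _ _ hlv
      have haccess : PySem.List.pyGetD access (k : Int) "" = access[k] := by
        rw [PySem.List.pyGetD_eq_getElem access "" (by positivity) (by exact_mod_cast hka)]
        simp
      rw [if_pos hc, haccess, hgetD, if_pos (by
        rw [List.getD_eq_getElem access "" hka] at hm
        exact hm)]
    · -- the match is further right: every branch that does not return recurses
      have hrec : ∀ auth' : Bool,
          ca_loop access cs accD auth' (PySem.List.pyRange ((i+1 : Nat) : Int) (cs.length : Int) 1) = true := by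
        intro auth'
        exact ih (i+1) auth' (by omega) ⟨k, by omega, hkc, hka, lv, hlv, hm⟩
      by_cases hc : accD.contains cs[i]
      · rw [if_pos hc]
        by_cases hm2 : PySem.List.pyGetD access (i : Int) "" ∈ accD.getD cs[i] []
        · rw [if_pos hm2]
        · rw [if_neg hm2]
          exact hrec auth
      · rw [if_neg hc]
        by_cases hw : cs[i] = ""
        · rw [if_pos hw]
          exact hrec _
        · rw [if_neg hw]
          exact hrec auth

theorem main_core (access cs : List String) (accD : PySem.Dict String (List String))
    (hnd : accD.keys.Nodup)
    (hcase : (∀ c ∈ cs.drop access.length, accD.contains c = false ∧ c ≠ "") ∨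
      (∃ p ∈ cs.zip access, ∃ lv, accD.get? p.1 = some lv ∧ p.2 ∈ lv)) :
    ca_loop access cs accD false (PySem.List.pyRange 0 (cs.length : Int) 1)
      = (cs.zip access).any (ca_f accD) := by
  rcases hcase with hsafe | ⟨p, hp, lv, hlv, hm⟩
  · have h := ca_loop_safe access cs accD hnd hsafe cs.length 0 false (by omega)
    simpa using h
  · obtain ⟨k, hk, hpk⟩ := List.getElem_of_mem hp
    have hkc : k < cs.length := by
      have := List.length_zip (l₁ := cs) (l₂ := access)
      omega
    have hka : k < access.length := by
      have := List.length_zip (l₁ := cs) (l₂ := access)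
      omega
    have hpe : p = (cs[k], access[k]) := by rw [← hpk, List.getElem_zip]
    have hA : ca_loop access cs accD false (PySem.List.pyRange 0 (cs.length : Int) 1) = true := by
      have h := ca_loop_hit access cs accD cs.length 0 false (by omega)
        ⟨k, by omega, hkc, hka, lv, by
          rw [List.getD_eq_getElem cs "" hkc]
          rw [hpe] at hlv
          exact hlv, by
          rw [List.getD_eq_getElem access "" hka]
          rw [hpe] at hm
          exact hm⟩
      simpa using h
    rw [hA]
    have hB : (cs.zip access).any (ca_f accD) = true := by
      rw [List.any_eq_true]
      refine ⟨p, hp, ?_⟩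
      rw [hpe] at hlv hm ⊢
      simp [ca_f, hlv, hm]
    rw [hB]

theorem check_access_eq_alt (access : List String) (countries : List String) (acc : List (String × List String))
    (hpre : Pre_check_access access countries acc) :
    check_access access countries acc = check_access_alt access countries acc := by
  obtain ⟨hnd, hne, hcase⟩ := hpre
  have hndk : (PySem.Dict.mk acc).keys.Nodup := by
    simpa [PySem.Dict.keys, PySem.Dict.items] using hnd
  unfold check_access check_access_alt
  by_cases hlen : countries.length < access.length
  · -- extension happens
    have hane : access ≠ [] := by
      intro h; rw [h] at hlen; simp at hlen
    have hcne : countries ≠ [] := hne hane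
    have hclen : 0 < countries.length := List.length_pos_iff.mpr hcne
    -- A's extended list equals B's
    have hrlen : (PySem.List.pyRange (countries.length : Int) (access.length : Int) 1).length
        = access.length - countries.length := by
      rw [PySem.List.length_pyRange_one]
      omega
    have hvB : PySem.List.pyGetD countries (-1) ""
        = PySem.List.pyGetD countries ((countries.length : Int) - 1) "" := by
      rw [PySem.List.pyGetD_neg_one countries "" hcne,
          PySem.List.pyGetD_eq_getElem countries "" (by omega) (by omega)]
      rw [List.getLast_eq_getElem]
      congr 1
      omega
    have hext : ca_extend (countries.length : Int)
        (PySem.List.pyRange (countries.length : Int) (access.length : Int) 1) countries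
        = countries ++ List.replicate (access.length - countries.length)
            (PySem.List.pyGetD countries (-1) "") := by
      rw [ca_extend_eq _ _ _ (by exact_mod_cast hclen) (by omega), hrlen, hvB]
    simp only [if_pos hlen, hext]
    set cs := countries ++ List.replicate (access.length - countries.length)
        (PySem.List.pyGetD countries (-1) "") with hcs
    have hcslen : cs.length = access.length := by
      simp [hcs]
      omega
    refine main_core access cs (PySem.Dict.mk acc) hndk ?_
    rcases hcase with hsafe | ⟨p, hp, lv, hlv, hm⟩
    · left
      intro c hc
      rw [List.drop_eq_nil_of_le (by omega)] at hc
      simp at hc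
    · right
      obtain ⟨k, hk, hpk⟩ := List.getElem_of_mem hp
      have hkc : k < countries.length := by
        have := List.length_zip (l₁ := countries) (l₂ := access)
        omega
      have hka : k < access.length := by
        have := List.length_zip (l₁ := countries) (l₂ := access)
        omega
      have hk2 : k < (cs.zip access).length := by
        rw [List.length_zip]
        omega
      refine ⟨(cs.zip access)[k], List.getElem_mem hk2, lv, ?_, ?_⟩
      · rw [List.getElem_zip]
        have : cs[k]'(by omega) = countries[k] := List.getElem_append_left hkc
        rw [this]
        rw [← hpk, List.getElem_zip] at hlv
        exact hlv
      · rw [List.getElem_zip]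
        rw [← hpk, List.getElem_zip] at hm
        exact hm
  · simp only [if_neg hlen]
    exact main_core access countries (PySem.Dict.mk acc) hndk hcase

-- ===== VERDICT (by name: the statement is the Claim_ definition above) =====
theorem check_access_spec : Claim_equal_check_access := by
  intro access countries acc _hdom hpre
  unfold Spec_check_access
  exact check_access_eq_alt access countries acc hpre
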